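-- pv_equiv track=rewrite | github.com/v-t-9/PythonDataTypes-w3r | String/ex48.py | swap_commas_dots
-- ===== SOURCE A (Python) =====
-- def swap_commas_dots(s):
--     r = ""
--     for i in s:
--         if i == ".":
--             r = r + ","
--         elif i == ",":
--             r = r + "."
--         else:
--             r = r + i
--     return r
-- ===== SOURCE B (Python) =====
-- def swap_commas_dots(s):
--     # staged pipeline: cut the string at commas, turn the dots inside each
--     # piece into commas, then glue the pieces back together with dots
--     return ".".join(part.replace(".", ",") for part in s.split(","))
-- ===== Notes on version B (the rewrite author's own statement) =====
-- stated objective: alternative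
-- what changed: Replaces the character-by-character accumulator loop with if/elif branches by a three-stage pipeline: split the string at commas, replace the dots inside each piece by commas, and rejoin the pieces with dots.
import Mathlib
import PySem

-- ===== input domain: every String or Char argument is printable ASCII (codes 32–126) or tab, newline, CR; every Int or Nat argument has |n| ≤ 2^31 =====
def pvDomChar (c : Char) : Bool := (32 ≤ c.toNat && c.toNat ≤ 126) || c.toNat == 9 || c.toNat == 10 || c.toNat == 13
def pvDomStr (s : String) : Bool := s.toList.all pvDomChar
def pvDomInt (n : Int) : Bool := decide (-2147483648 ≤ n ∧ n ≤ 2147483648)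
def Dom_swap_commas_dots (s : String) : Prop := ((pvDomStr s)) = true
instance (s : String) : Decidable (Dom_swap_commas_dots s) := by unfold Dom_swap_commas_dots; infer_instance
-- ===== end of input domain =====

-- B replaces A's per-character branch loop by a split-on-','/replace-'.'/join-with-'.' pipeline (objective: alternative).

-- ===== PORT A =====
-- literal port of A: loop over the characters, growing the result string r
def swap_commas_dots (s : String) : String :=
  s.toList.foldl
    (fun r i =>
      if i = '.' then r ++ ","
      else if i = ',' then r ++ "."
      else r ++ String.ofList [i]) ""

-- ===== PORT B =====
-- '.'.join(part.replace('.', ',') for part in s.split(','))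
-- s.split(',') with the nonempty literal separator is PySem.Chars.splitOn on the code points
def swap_commas_dots_alt (s : String) : String :=
  PySem.Str.join "."
    ((PySem.Chars.splitOn s.toList [',']).map
      (fun part => PySem.Str.replace (String.ofList part) "." ","))

-- ===== PRECONDITION & SPEC =====
def Spec_swap_commas_dots (s : String) (out : String) : Prop := out = swap_commas_dots_alt s
instance (s : String) (out : String) : Decidable (Spec_swap_commas_dots s out) := by unfold Spec_swap_commas_dots; infer_instance

-- ===== CLAIM (what is proved, stated in full; the proofs are below) =====
def Claim_equal_swap_commas_dots : Prop := ∀ (s : String), Dom_swap_commas_dots s → Spec_swap_commas_dots s (swap_commas_dots s)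

-- ===== LEMMAS AND PROOFS =====

-- the full swap performed by A, character by character
def pvFullSwap (c : Char) : Char := if c = '.' then ',' else if c = ',' then '.' else c
-- the dot-only substitution performed by B's replace stage
def pvDotSwap (c : Char) : Char := if c = '.' then ',' else c

-- A's loop builds the map of pvFullSwap
theorem swap_loop_eq (l : List Char) (r : String) :
    l.foldl
      (fun r i =>
        if i = '.' then r ++ ","
        else if i = ',' then r ++ "."
        else r ++ String.ofList [i]) r
      = r ++ String.ofList (l.map pvFullSwap) := by
  induction l generalizing r with
  | nil => simp
  | cons c t ih =>
    simp only [List.foldl, List.map, ih, pvFullSwap]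
    split_ifs with h1 h2 <;> simp [String.ext_iff]

-- reference splitter: the pieces of l between commas, pre being the piece under construction
def pvPieces : List Char → List Char → List (List Char)
  | pre, [] => [pre]
  | pre, c :: t => if c = ',' then pre :: pvPieces [] t else pvPieces (pre ++ [c]) t

theorem pvPieces_ne_nil (pre l : List Char) : pvPieces pre l ≠ [] := by
  induction l generalizing pre with
  | nil => simp [pvPieces]
  | cons c t ih => simp only [pvPieces]; split_ifs <;> simp [ih]

-- PySem's fueled splitOn.go with single-char separator ',' computes pvPieces

theorem splitOn_go_spec (fuel : Nat) (l cur : List Char) (acc : List (List Char))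
    (h : l.length < fuel) :
    PySem.Chars.splitOn.go [','] fuel l cur acc = acc.reverse ++ pvPieces cur.reverse l := by
  induction fuel generalizing l cur acc with
  | zero => omega
  | succ fuel ih =>
    cases l with
    | nil => simp [PySem.Chars.splitOn.go, pvPieces]
    | cons c t =>
      rw [PySem.Chars.splitOn.go]
      by_cases hc : c = ','
      · subst hc
        have hp : List.isPrefixOf [','] (',' :: t) = true := by simp [List.isPrefixOf]
        simp only [hp, if_true]
        rw [show List.drop [','].length (',' :: t) = t from rfl]
        rw [ih t [] (cur.reverse :: acc) (by simpa using Nat.lt_of_succ_lt_succ h)]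
        simp [pvPieces]
      · have hp : List.isPrefixOf [','] (c :: t) = false := by
          simp only [List.isPrefixOf, Bool.and_eq_false_iff, beq_eq_false_iff_ne]
          exact Or.inl fun h => hc h.symm
        simp only [hp, if_false, Bool.false_eq_true]
        rw [ih t (c :: cur) acc (by simpa using Nat.lt_of_succ_lt_succ h)]
        simp [pvPieces, hc]

-- PySem's fueled replace.go with '.' → ',' computes the map of pvDotSwap
theorem replace_go_spec (fuel : Nat) (l acc : List Char) (h : l.length ≤ fuel) :
    PySem.Chars.replace.go ['.'] [','] fuel l acc = acc.reverse ++ l.map pvDotSwap := by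
  induction fuel generalizing l acc with
  | zero => cases l with
    | nil => simp [PySem.Chars.replace.go]
    | cons c t => simp at h
  | succ fuel ih =>
    cases l with
    | nil => simp [PySem.Chars.replace.go]
    | cons c t =>
      rw [PySem.Chars.replace.go]
      by_cases hc : c = '.'
      · subst hc
        have hp : List.isPrefixOf ['.'] ('.' :: t) = true := by simp [List.isPrefixOf]
        simp only [hp, if_true]
        rw [show List.drop ['.'].length ('.' :: t) = t from rfl]
        rw [show (List.reverse [','] ++ acc) = ',' :: acc from rfl]
        rw [ih t (',' :: acc) (by simpa using Nat.le_of_succ_le_succ h)]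
        simp [pvDotSwap]
      · have hp : List.isPrefixOf ['.'] (c :: t) = false := by
          simp only [List.isPrefixOf, Bool.and_eq_false_iff, beq_eq_false_iff_ne]
          exact Or.inl fun h => hc h.symm
        simp only [hp, if_false, Bool.false_eq_true]
        rw [ih t (c :: acc) (by simpa using Nat.le_of_succ_le_succ h)]
        simp [pvDotSwap, hc]

theorem chars_replace_eq (p : List Char) :
    PySem.Chars.replace p ['.'] [','] = p.map pvDotSwap := by
  rw [PySem.Chars.replace]
  simp only [List.isEmpty_cons, if_false, Bool.false_eq_true]
  exact replace_go_spec p.length p [] le_rfl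

-- joining the dot-swapped pieces with '.' rebuilds the full swap
theorem join_pieces (l pre : List Char) :
    PySem.Chars.join ['.'] ((pvPieces pre l).map (List.map pvDotSwap))
      = pre.map pvDotSwap ++ l.map pvFullSwap := by
  induction l generalizing pre with
  | nil =>
    simp only [pvPieces, List.map_cons, List.map_nil, PySem.Chars.join_singleton]
    simp
  | cons c t ih =>
    by_cases hc : c = ','
    · subst hc
      simp only [pvPieces, if_true, List.map_cons]
      obtain ⟨q, rest, hq⟩ : ∃ q rest, (pvPieces ([] : List Char) t).map (List.map pvDotSwap) = q :: rest := by
        cases hpp : pvPieces ([] : List Char) t with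
        | nil => exact absurd hpp (pvPieces_ne_nil _ _)
        | cons a b => exact ⟨_, _, rfl⟩
      rw [hq, PySem.Chars.join_cons_cons, ← hq, ih]
      simp [pvFullSwap]
    · simp only [pvPieces, hc, if_false]
      rw [ih]
      simp [pvFullSwap, pvDotSwap, hc]

-- ===== VERDICT (by name: the statement is the Claim_ definition above) =====
theorem swap_commas_dots_spec : Claim_equal_swap_commas_dots := by
  intro s _
  unfold Spec_swap_commas_dots swap_commas_dots swap_commas_dots_alt
  rw [swap_loop_eq s.toList ""]
  rw [PySem.Chars.splitOn, splitOn_go_spec _ _ _ _ (Nat.lt_succ_self _)]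
  simp only [List.reverse_nil, List.nil_append]
  rw [PySem.Str.join]
  simp only [List.map_map]
  have hmap : (List.map (String.toList ∘ fun part => PySem.Str.replace (String.ofList part) "." ",")
      (pvPieces [] s.toList)) = (pvPieces [] s.toList).map (List.map pvDotSwap) := by
    apply List.map_congr_left
    intro p _
    simp [PySem.Str.replace, chars_replace_eq]
  rw [hmap]
  have := join_pieces s.toList []
  simp only [List.map_nil, List.nil_append] at this
  simp [this]
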